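-- pv_equiv track=rewrite | github.com/cielavenir/procon | hena/tyama_henae15.py | place2num
-- ===== SOURCE A (Python) =====
-- def place2num(x,y):
-- 	if x<0 or y<0 or x&y>0: return None
-- 	n=0
-- 	z=1
-- 	while x>0 or y>0:
-- 		if x%2>0:
-- 			n+=z
-- 		elif y%2>0:
-- 			n+=2*z
-- 		x//=2
-- 		y//=2
-- 		z*=3
-- 	return n
-- ===== SOURCE B (Python) =====
-- def place2num(x, y):
--     # Closed form: since x and y share no set bits, read x's binary digits as a
--     # base-3 number (each set bit contributes digit 1) and add twice the same
--     # for y (digit 2) -- no interleaving loop needed.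
--     if x < 0 or y < 0 or x & y > 0:
--         return None
--     return int(bin(x)[2:], 3) + 2 * int(bin(y)[2:], 3)
-- ===== Notes on version B (the rewrite author's own statement) =====
-- stated objective: simpler
-- what changed: Replaces the interleaving while-loop with accumulators n,z by a closed-form expression: parse bin(x) and bin(y) as base-3 numbers and return the first plus twice the second (valid because the guard ensures x and y share no set bits).
import Mathlib
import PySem

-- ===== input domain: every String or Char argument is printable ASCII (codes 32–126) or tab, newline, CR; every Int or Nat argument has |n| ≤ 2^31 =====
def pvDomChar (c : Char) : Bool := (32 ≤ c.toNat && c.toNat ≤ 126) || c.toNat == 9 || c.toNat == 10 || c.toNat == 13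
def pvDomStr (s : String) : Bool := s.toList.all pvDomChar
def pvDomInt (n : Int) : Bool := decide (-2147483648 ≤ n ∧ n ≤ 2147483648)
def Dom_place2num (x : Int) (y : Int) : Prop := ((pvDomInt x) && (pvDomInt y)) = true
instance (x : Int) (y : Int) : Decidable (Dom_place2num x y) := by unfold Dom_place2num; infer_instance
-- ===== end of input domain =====

-- B replaces A's interleaving while-loop by a closed form (parse bin(x), bin(y) as base-3
-- numbers and return the first plus twice the second); objective: simpler.

-- ===== PORT A =====
-- the while-loop of A, state (x, y, n, z)
def place2numLoop (x : Int) (y : Int) (n : Int) (z : Int) : Int :=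
  if x > 0 ∨ y > 0 then
    let n' := if PySem.Int.mod x 2 > 0 then n + z
              else if PySem.Int.mod y 2 > 0 then n + 2 * z else n
    place2numLoop (PySem.Int.floordiv x 2) (PySem.Int.floordiv y 2) n' (z * 3)
  else n
termination_by x.toNat + y.toNat
decreasing_by
  simp only [PySem.Int.floordiv_eq_ediv_of_pos (by omega : (0:Int) < 2)]
  omega

def place2num (x : Int) (y : Int) : Option Int :=
  if x < 0 ∨ y < 0 ∨ PySem.Int.band x y > 0 then none
  else some (place2numLoop x y 0 1)

-- ===== PORT B =====
-- bin(n)[2:] as a list of chars: digits LSB-first, then reversed ('0' for n = 0)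
def toBinRev : Nat → List Char
  | 0 => []
  | n+1 => (if (n+1) % 2 = 1 then '1' else '0') :: toBinRev ((n+1)/2)
decreasing_by omega

def pvBin (n : Nat) : List Char := if n = 0 then ['0'] else (toBinRev n).reverse

-- int(s, 3): left fold over the digit characters
def pvParse3 (s : List Char) : Int := s.foldl (fun acc c => acc * 3 + ((c.toNat : Int) - 48)) 0

def place2num_alt (x : Int) (y : Int) : Option Int :=
  if x < 0 ∨ y < 0 ∨ PySem.Int.band x y > 0 then none
  else some (pvParse3 (pvBin x.toNat) + 2 * pvParse3 (pvBin y.toNat))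

-- ===== PRECONDITION & SPEC =====
def Spec_place2num (x : Int) (y : Int) (out : Option Int) : Prop := out = place2num_alt x y
instance (x : Int) (y : Int) (out : Option Int) : Decidable (Spec_place2num x y out) := by unfold Spec_place2num; infer_instance

-- ===== CLAIM (what is proved, stated in full; the proofs are below) =====
def Claim_equal_place2num : Prop := ∀ (x : Int) (y : Int), Dom_place2num x y → Spec_place2num x y (place2num x y)

-- ===== LEMMAS AND PROOFS =====

-- the common value: binary digits of n read as a base-3 number
def pvG : Nat → Int
  | 0 => 0
  | n+1 => 3 * pvG ((n+1)/2) + (((n+1) % 2 : Nat) : Int)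
decreasing_by omega

theorem pvG_pos (a : Nat) (h : 0 < a) : pvG a = 3 * pvG (a/2) + ((a % 2 : Nat) : Int) := by
  obtain ⟨m, rfl⟩ : ∃ m, a = m + 1 := ⟨a - 1, by omega⟩
  rw [pvG]

theorem parse_aux (n : Nat) : ∀ acc : Int,
    List.foldl (fun acc c => acc * 3 + ((c.toNat : Int) - 48)) acc (toBinRev n).reverse
      = acc * 3 ^ (toBinRev n).length + pvG n := by
  induction n using Nat.strong_induction_on with
  | _ n ih =>
    intro acc
    match n with
    | 0 => simp [toBinRev, pvG]
    | m+1 =>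
      rw [toBinRev, pvG]
      simp only [List.reverse_cons, List.foldl_append, List.foldl_cons, List.foldl_nil,
        List.length_cons]
      rw [ih ((m+1)/2) (by omega) acc]
      have h0 : (('0'.toNat : Int) - 48) = 0 := by decide
      have h1 : (('1'.toNat : Int) - 48) = 1 := by decide
      rcases Nat.mod_two_eq_zero_or_one (m+1) with hpar | hpar
      · rw [if_neg (by omega : ¬ (m+1) % 2 = 1), h0, hpar]
        push_cast; ring
      · rw [if_pos hpar, h1, hpar]
        push_cast; ring

theorem parse_bin (a : Nat) : pvParse3 (pvBin a) = pvG a := by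
  unfold pvParse3 pvBin
  by_cases h : a = 0
  · subst h; simp [pvG]
  · simp only [h, if_false]
    rw [parse_aux a 0]; simp

theorem loop_eq (k : Nat) : ∀ a b : Nat, a + b ≤ k →
    (∀ i, ¬(a.testBit i = true ∧ b.testBit i = true)) →
    ∀ n z : Int, place2numLoop (a : Int) (b : Int) n z = n + z * (pvG a + 2 * pvG b) := by
  induction k with
  | zero =>
    intro a b hk _ n z
    have ha : a = 0 := by omega
    have hb : b = 0 := by omega
    subst ha; subst hb
    rw [place2numLoop]
    simp [pvG]
  | succ k ih =>
    intro a b hk hdisj n z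
    by_cases hz : a = 0 ∧ b = 0
    · obtain ⟨ha, hb⟩ := hz; subst ha; subst hb
      rw [place2numLoop]; simp [pvG]
    · rw [place2numLoop]
      have hguard : ((a:Int) > 0 ∨ (b:Int) > 0) := by omega
      rw [if_pos hguard]
      have hfa : PySem.Int.floordiv (a:Int) 2 = ((a/2 : Nat) : Int) := by
        exact_mod_cast PySem.Int.floordiv_natCast a 2
      have hfb : PySem.Int.floordiv (b:Int) 2 = ((b/2 : Nat) : Int) := by
        exact_mod_cast PySem.Int.floordiv_natCast b 2
      have hma : PySem.Int.mod (a:Int) 2 = ((a % 2 : Nat) : Int) := by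
        exact_mod_cast PySem.Int.mod_natCast a 2
      have hmb : PySem.Int.mod (b:Int) 2 = ((b % 2 : Nat) : Int) := by
        exact_mod_cast PySem.Int.mod_natCast b 2
      have hdisj' : ∀ i, ¬((a/2).testBit i = true ∧ (b/2).testBit i = true) := by
        intro i hi
        exact hdisj (i+1) (by
          constructor
          · rw [Nat.testBit_succ]; exact hi.1
          · rw [Nat.testBit_succ]; exact hi.2)
      have hrec := ih (a/2) (b/2) (by omega) hdisj'
      have hga : pvG a = 3 * pvG (a/2) + ((a % 2 : Nat) : Int) := by
        rcases Nat.eq_zero_or_pos a with h | h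
        · subst h; simp [pvG]
        · exact pvG_pos a h
      have hgb : pvG b = 3 * pvG (b/2) + ((b % 2 : Nat) : Int) := by
        rcases Nat.eq_zero_or_pos b with h | h
        · subst h; simp [pvG]
        · exact pvG_pos b h
      have h0 := hdisj 0
      rw [Nat.testBit_zero, Nat.testBit_zero] at h0
      by_cases hao : a % 2 = 1
      · have hbo : b % 2 = 0 := by
          by_contra hb
          exact h0 ⟨by simp [hao], by simp; omega⟩
        rw [hma, hmb, hao, hbo]
        simp only [Nat.cast_one, Nat.cast_zero]
        rw [if_pos (by omega)]
        rw [hfa, hfb, hrec]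
        rw [hga, hgb, hao, hbo]
        push_cast; ring
      · have hae : a % 2 = 0 := by omega
        rw [hma, hmb, hae]
        simp only [Nat.cast_zero]
        rw [if_neg (by omega)]
        by_cases hbo : b % 2 = 1
        · rw [hbo]
          simp only [Nat.cast_one]
          rw [if_pos (by omega)]
          rw [hfa, hfb, hrec]
          rw [hga, hgb, hae, hbo]
          push_cast; ring
        · have hbe : b % 2 = 0 := by omega
          rw [hbe]
          simp only [Nat.cast_zero]
          rw [if_neg (by omega)]
          rw [hfa, hfb, hrec]
          rw [hga, hgb, hae, hbe]
          push_cast; ring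

-- ===== VERDICT (by name: the statement is the Claim_ definition above) =====
theorem place2num_spec : Claim_equal_place2num := by
  intro x y _
  unfold Spec_place2num place2num place2num_alt
  by_cases hg : x < 0 ∨ y < 0 ∨ PySem.Int.band x y > 0
  · rw [if_pos hg, if_pos hg]
  · rw [if_neg hg, if_neg hg]
    push_neg at hg
    obtain ⟨hx, hy, hband⟩ := hg
    have hxa : x = ((x.toNat : Nat) : Int) := (Int.toNat_of_nonneg hx).symm
    have hya : y = ((y.toNat : Nat) : Int) := (Int.toNat_of_nonneg hy).symm
    set a := x.toNat with ha
    set b := y.toNat with hb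
    have hband' : PySem.Int.band x y = ((a &&& b : Nat) : Int) := by
      rw [hxa, hya]; exact_mod_cast PySem.Int.band_natCast a b
    have hland : a &&& b = 0 := by
      rw [hband'] at hband; omega
    have hdisj : ∀ i, ¬(a.testBit i = true ∧ b.testBit i = true) := by
      intro i ⟨h1, h2⟩
      have hti := Nat.testBit_and a b i
      rw [hland, h1, h2] at hti
      simp at hti
    rw [hxa, hya, loop_eq (a + b) a b le_rfl hdisj 0 1]
    rw [parse_bin, parse_bin]
    ring
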